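-- pv_equiv track=rewrite | github.com/manaakiwhenua/anh | anh/tools.py | uniquify_strings
-- ===== SOURCE A (Python) =====
-- def uniquify_strings(strings):
--     repeats = {}
--     for s in strings:
--         if s in repeats:
--             repeats[s] +=1
--         else:
--             repeats[s] = 1
--     retval = []
--     counts = {}
--     for s in strings:
--         if s in counts:
--             counts[s] += 1
--         else:
--             counts[s] = 1
--         if repeats[s] == 1:
--             retval.append(s)
--         else:
--             retval.append(s+'_'+str(counts[s]))
--     return retval
-- ===== SOURCE B (Python) =====
-- def uniquify_strings(strings):
--     out = []
--     seen = {}   # string -> occurrences so far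
--     first = {}  # string -> index of its first occurrence
--     for i, s in enumerate(strings):
--         c = seen.get(s, 0) + 1
--         seen[s] = c
--         if c == 1:
--             first[s] = i
--             out.append(s)
--         else:
--             if c == 2:
--                 # s turned out to be a duplicate: retroactively suffix its first occurrence
--                 out[first[s]] = s + '_1'
--             out.append(s + '_' + str(c))
--     return out
-- ===== Notes on version B (the rewrite author's own statement) =====
-- stated objective: alternative
-- what changed: Single forward pass instead of A's two passes: a running counter numbers each occurrence immediately, and when a string first turns out to be a duplicate its already-emitted first occurrence is retroactively rewritten to s_1 via a remembered index.
import Mathlib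
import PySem

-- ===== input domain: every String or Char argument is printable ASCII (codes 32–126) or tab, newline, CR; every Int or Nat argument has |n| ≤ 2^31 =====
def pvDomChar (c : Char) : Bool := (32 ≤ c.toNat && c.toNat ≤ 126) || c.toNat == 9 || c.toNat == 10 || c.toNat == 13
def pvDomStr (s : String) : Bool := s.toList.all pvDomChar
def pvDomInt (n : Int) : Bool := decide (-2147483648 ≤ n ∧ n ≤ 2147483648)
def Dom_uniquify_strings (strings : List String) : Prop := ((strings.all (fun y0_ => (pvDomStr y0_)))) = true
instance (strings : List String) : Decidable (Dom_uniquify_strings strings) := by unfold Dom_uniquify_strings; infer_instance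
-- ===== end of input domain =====

-- B replaces A's two passes by a single forward pass that numbers occurrences immediately and
-- retroactively rewrites the first occurrence of a string when it turns out to be duplicated.

-- ===== PORT A =====
-- A, step for step: first loop builds the dict `repeats` of total occurrence counts
-- ('if s in repeats' ported as a match on get?), second loop builds retval and the running
-- dict `counts`. `repeats[s]` / `counts[s]` are ported as getD _ 0: the key is always present.
def uniquify_strings (strings : List String) : List String :=
  let repeats : PySem.Dict String Int :=
    strings.foldl (fun d s =>
      match d.get? s with
      | some v => d.insert s (v + 1)
      | none   => d.insert s 1) PySem.Dict.empty
  let res :=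
    strings.foldl (fun (acc : List String × PySem.Dict String Int) s =>
      let counts :=
        match acc.2.get? s with
        | some v => acc.2.insert s (v + 1)
        | none   => acc.2.insert s 1
      if repeats.getD s 0 == 1 then (acc.1 ++ [s], counts)
      else (acc.1 ++ [s ++ "_" ++ PySem.Int.toStr (counts.getD s 0)], counts))
      ([], PySem.Dict.empty)
  res.1

-- ===== PORT B =====
-- out[i] = v for a Python list: exact for 0 <= i < len(out), the only case B's algorithm reaches
-- (first[s] is always the index of an already-emitted element; Python raises IndexError otherwise).
def pyAssign (out : List String) (i : Int) (v : String) : List String := out.set i.toNat v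

-- B, step for step: one fold over enumerate(strings) carrying (out, seen, first).
def uniquify_strings_alt (strings : List String) : List String :=
  let res := (PySem.List.enumerate strings 0).foldl
    (fun (st : List String × PySem.Dict String Int × PySem.Dict String Int) p =>
      let c := st.2.1.getD p.2 0 + 1
      let seen := st.2.1.insert p.2 c
      if c == 1 then
        (st.1 ++ [p.2], seen, st.2.2.insert p.2 p.1)
      else
        ((if c == 2 then pyAssign st.1 (st.2.2.getD p.2 0) (p.2 ++ "_1") else st.1)
           ++ [p.2 ++ "_" ++ PySem.Int.toStr c], seen, st.2.2))
    ([], PySem.Dict.empty, PySem.Dict.empty)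
  res.1

-- ===== PRECONDITION & SPEC =====
def Spec_uniquify_strings (strings : List String) (out : List String) : Prop := out = uniquify_strings_alt strings
instance (strings : List String) (out : List String) : Decidable (Spec_uniquify_strings strings out) := by unfold Spec_uniquify_strings; infer_instance

-- ===== CLAIM (what is proved, stated in full; the proofs are below) =====
def Claim_equal_uniquify_strings : Prop := ∀ (strings : List String), Dom_uniquify_strings strings → Spec_uniquify_strings strings (uniquify_strings strings)

-- ===== LEMMAS AND PROOFS =====

-- A's 'if s in d' update step equals the unconditional insert (d.getD s 0 + 1).
theorem pv_step_eq (d : PySem.Dict String Int) (s : String) :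
    (match d.get? s with
     | some v => d.insert s (v + 1)
     | none   => d.insert s 1) = d.insert s (d.getD s 0 + 1) := by
  rw [PySem.Dict.getD_eq_get?_getD]
  cases d.get? s <;> simp

theorem pv_repeats_getD (strings : List String) (s : String) :
    (strings.foldl (fun (d : PySem.Dict String Int) s =>
      match d.get? s with
      | some v => d.insert s (v + 1)
      | none   => d.insert s 1) PySem.Dict.empty).getD s 0 = (strings.count s : Int) := by
  have h : (fun (d : PySem.Dict String Int) s =>
      match d.get? s with
      | some v => d.insert s (v + 1)
      | none   => d.insert s 1) = (fun d s => d.insert s (d.getD s 0 + 1)) := by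
    funext d s; exact pv_step_eq d s
  rw [h, PySem.Dict.getD_foldl_insert_add_one, PySem.Dict.getD_empty]
  ring

-- Loop invariant for A's second loop: with the prefix `pre` already consumed (acc the output
-- so far, d its counter), folding the rest produces B's values at the remaining indices.
theorem pv_loop (strings : List String) (rest pre acc : List String)
    (d : PySem.Dict String Int)
    (hsplit : strings = pre ++ rest)
    (hd : ∀ v, d.getD v 0 = (pre.count v : Int)) :
    (rest.foldl (fun (acc : List String × PySem.Dict String Int) s =>
      let counts :=
        match acc.2.get? s with
        | some v => acc.2.insert s (v + 1)
        | none   => acc.2.insert s 1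
      if (strings.foldl (fun (d : PySem.Dict String Int) s =>
            match d.get? s with
            | some v => d.insert s (v + 1)
            | none   => d.insert s 1) PySem.Dict.empty).getD s 0 == 1
      then (acc.1 ++ [s], counts)
      else (acc.1 ++ [s ++ "_" ++ PySem.Int.toStr (counts.getD s 0)], counts))
      (acc, d)).1
    = acc ++ (PySem.List.enumerate rest (pre.length : Int)).map (fun p =>
        if strings.count p.2 == 1 then p.2
        else p.2 ++ "_" ++ PySem.Int.toStr
          (((PySem.List.slice strings none (some (p.1 + 1))).count p.2 : Int))) := by
  induction rest generalizing pre acc d with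
  | nil => simp [PySem.List.enumerate]
  | cons s rest' ih =>
    rw [List.foldl_cons]
    have hcounts : (match d.get? s with
        | some v => d.insert s (v + 1)
        | none   => d.insert s 1) = d.insert s (d.getD s 0 + 1) := pv_step_eq d s
    have hsplit' : strings = (pre ++ [s]) ++ rest' := by simp [hsplit]
    have hd' : ∀ v, (d.insert s (d.getD s 0 + 1)).getD v 0 = ((pre ++ [s]).count v : Int) := by
      intro v
      rw [PySem.Dict.getD_insert]
      by_cases hv : v = s
      · subst hv; simp [hd v, List.count_append]
      · simp [hd v, List.count_append, hv, Ne.symm hv]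
    have hrep : (strings.foldl (fun (d : PySem.Dict String Int) s =>
        match d.get? s with
        | some v => d.insert s (v + 1)
        | none   => d.insert s 1) PySem.Dict.empty).getD s 0 = (strings.count s : Int) :=
      pv_repeats_getD strings s
    have hbeq : (((strings.count s : Int)) == 1) = (strings.count s == 1) := by
      by_cases h1 : strings.count s = 1
      · simp [h1]
      · have h2 : ((strings.count s : Int)) ≠ 1 := by exact_mod_cast h1
        simp [h1, h2]
    have htake : PySem.List.slice strings none (some ((pre.length : Int) + 1)) = pre ++ [s] := by
      have : ((pre.length : Int) + 1) = ((pre.length + 1 : Nat) : Int) := by push_cast; ring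
      rw [this, PySem.List.slice_to_natCast, hsplit]
      simp [List.take_append]
    have henum : PySem.List.enumerate (s :: rest') (pre.length : Int)
        = ((pre.length : Int), s) :: PySem.List.enumerate rest' ((pre.length : Int) + 1) := by
      simp [PySem.List.enumerate_cons]
    simp only [hcounts, hrep, hbeq]
    by_cases hone : strings.count s = 1
    · rw [if_pos (by simp [hone])]
      rw [ih (pre ++ [s]) (acc ++ [s]) _ hsplit' hd']
      rw [henum]
      simp [hone, List.append_assoc]
    · rw [if_neg (by simp [hone])]
      have hval : ((d.insert s (d.getD s 0 + 1)).getD s 0) = (pre.count s : Int) + 1 := by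
        rw [PySem.Dict.getD_insert]; simp [hd s]
      rw [hval]
      rw [ih (pre ++ [s]) _ _ hsplit' hd']
      rw [henum]
      simp [hone, htake, List.append_assoc]

-- The common closed form both loops produce at index i: the bare string when it occurs once,
-- otherwise the string suffixed with its occurrence number within strings[:i+1].
def pvF (l : List String) (p : Int × String) : String :=
  if l.count p.2 == 1 then p.2
  else p.2 ++ "_" ++ PySem.Int.toStr ((PySem.List.slice l none (some (p.1 + 1))).count p.2 : Int)

-- a value occurring exactly once occupies a unique position
theorem pv_count_one_unique (l : List String) (s : String) (h1 : l.count s = 1)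
    (j k : Nat) (hj : j < l.length) (hk : k < l.length)
    (hjs : l[j] = s) (hks : l[k] = s) : j = k := by
  by_contra hne
  -- split at the larger index: one occurrence in the take, one in the drop, so count ≥ 2
  have key : ∀ a b : Nat, (ha : a < l.length) → (hb : b < l.length) → a < b → l[a] = s → l[b] = s → False := by
    intro a b ha hb hab ha' hb'
    have hmem1 : s ∈ l.take b := by
      refine List.mem_iff_getElem.mpr ⟨a, by simp [List.length_take]; omega, ?_⟩
      rw [List.getElem_take]; exact ha'
    have hmem2 : s ∈ l.drop b := by
      refine List.mem_iff_getElem.mpr ⟨0, by simp; omega, ?_⟩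
      rw [List.getElem_drop]; simpa using hb'
    have h2 : 2 ≤ (l.take b).count s + (l.drop b).count s := by
      have := List.count_pos_iff.mpr hmem1
      have := List.count_pos_iff.mpr hmem2
      omega
    rw [← List.count_append, List.take_append_drop] at h2
    omega
  rcases Nat.lt_trichotomy j k with h | h | h
  · exact key j k hj hk h hjs hks
  · exact hne h
  · exact key k j hk hj h hks hjs

theorem pv_take_append (pre : List String) (s : String) (k : Nat) (hk : k < pre.length) :
    PySem.List.slice (pre ++ [s]) none (some ((k : Int) + 1)) = pre.take (k + 1) := by
  have h1 : ((k : Int) + 1) = ((k + 1 : Nat) : Int) := by push_cast; ring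
  rw [h1, PySem.List.slice_to_natCast]
  exact List.take_append_of_le_length (by omega)

-- appending s leaves the entry of a position holding a different string unchanged
theorem pvF_append_ne (pre : List String) (s : String) (k : Nat) (hk : k < pre.length)
    (ht : pre[k] ≠ s) :
    pvF (pre ++ [s]) ((k : Int), pre[k]) = pvF pre ((k : Int), pre[k]) := by
  have hslice := pv_take_append pre s k hk
  have hslice' : PySem.List.slice pre none (some ((k : Int) + 1)) = pre.take (k + 1) := by
    have h0 : ((k : Int) + 1) = ((k + 1 : Nat) : Int) := by push_cast; ring
    rw [h0, PySem.List.slice_to_natCast]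
  have hc : (pre ++ [s]).count pre[k] = pre.count pre[k] := by
    simp [List.count_append, List.count_singleton]
    intro h; exact absurd h.symm ht
  simp only [pvF, hslice, hslice', hc]

-- appending s does not change the entries of positions already emitted, except (handled
-- separately) the unique bare occurrence of s itself when pre.count s = 1
theorem pv_map_congr (pre : List String) (s : String) (hs : pre.count s ≠ 1) :
    (PySem.List.enumerate pre 0).map (pvF pre)
      = (PySem.List.enumerate pre 0).map (pvF (pre ++ [s])) := by
  apply List.map_congr_left
  intro p hp
  rcases (PySem.List.mem_enumerate_iff _ _ _).mp hp with ⟨k, hk, rfl⟩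
  by_cases ht : pre[k] = s
  · have h1 : 1 ≤ pre.count s := List.count_pos_iff.mpr (ht ▸ List.getElem_mem hk)
    have h2 : 2 ≤ pre.count s := by omega
    have hslice := pv_take_append pre s k hk
    have hslice' : PySem.List.slice pre none (some ((k : Int) + 1)) = pre.take (k + 1) := by
      have h0 : ((k : Int) + 1) = ((k + 1 : Nat) : Int) := by push_cast; ring
      rw [h0, PySem.List.slice_to_natCast]
    have hc : (pre ++ [s]).count s = pre.count s + 1 := by simp [List.count_append]
    have hne1 : (pre.count s == 1) = false := by simp; omega
    have hne2 : (pre.count s + 1 == 1) = false := by simp; omega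
    rw [show ((0 : Int) + (k : Int)) = (k : Int) by ring]
    simp only [pvF, ht, hslice, hslice', hc, hne1, hne2]
  · rw [show ((0 : Int) + (k : Int)) = (k : Int) by ring]
    exact (pvF_append_ne pre s k hk ht).symm

theorem pv_map_set (pre : List String) (s : String) (j : Nat) (h1 : pre.count s = 1)
    (hj : j < pre.length) (hjs : pre[j]? = some s)
    (hone : (pre.take (j + 1)).count s = 1) :
    ((PySem.List.enumerate pre 0).map (pvF pre)).set j (s ++ "_1")
      = (PySem.List.enumerate pre 0).map (pvF (pre ++ [s])) := by
  rcases List.getElem?_eq_some_iff.mp hjs with ⟨hj', hjs'⟩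
  apply List.ext_getElem
  · simp [PySem.List.length_enumerate]
  intro i hi1 hi2
  have hi : i < pre.length := by
    simpa [PySem.List.length_enumerate] using hi2
  rw [List.getElem_set]
  simp only [List.getElem_map, PySem.List.getElem_enumerate]
  rw [show ((0 : Int) + (i : Int)) = (i : Int) by ring]
  split_ifs with hij
  · -- the unique bare occurrence of s is rewritten to s_1
    subst hij
    have hslice := pv_take_append pre s j hj
    have hc : (pre ++ [s]).count s = pre.count s + 1 := by simp [List.count_append]
    have hne2 : ¬(((pre.count s + 1 : Nat) == 1) = true) := by simp; omega
    simp only [pvF, hjs', hc, hslice, hone, Nat.cast_one]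
    rw [if_neg hne2]
    have ht1 : PySem.Int.toStr 1 = "1" := by decide
    have ht2 : ("_" : String) ++ "1" = "_1" := by decide
    rw [ht1, String.append_assoc, ht2]
  · -- any other position holds a different string (count s = 1), so its entry is unchanged
    have ht : pre[i] ≠ s := fun h =>
      hij (pv_count_one_unique pre s h1 j i hj hi hjs' h)
    exact (pvF_append_ne pre s i hi ht).symm

-- the entry emitted for the new element
theorem pv_new_entry (pre : List String) (s : String) :
    pvF (pre ++ [s]) ((pre.length : Int), s)
      = if pre.count s = 0 then s
        else s ++ "_" ++ PySem.Int.toStr ((pre.count s : Int) + 1) := by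
  have hc : (pre ++ [s]).count s = pre.count s + 1 := by simp [List.count_append]
  have hslice : PySem.List.slice (pre ++ [s]) none (some ((pre.length : Int) + 1))
      = pre ++ [s] := by
    have : ((pre.length : Int) + 1) = (((pre ++ [s]).length : Nat) : Int) := by simp
    rw [this, PySem.List.slice_to_natCast, List.take_length]
  simp only [pvF, hslice, hc]
  by_cases h : pre.count s = 0
  · simp [h]
  · have h1 : (pre.count s + 1 == 1) = false := by simp; omega
    rw [h1]
    simp [h]

-- appending a fresh string appends its bare entry
theorem pv_out_new (pre : List String) (t : String) (h : pre.count t = 0) :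
    (PySem.List.enumerate pre 0).map (pvF pre) ++ [t]
      = (PySem.List.enumerate (pre ++ [t]) 0).map (pvF (pre ++ [t])) := by
  rw [PySem.List.enumerate_append]
  rw [List.map_append]
  rw [pv_map_congr pre t (by omega)]
  congr 1
  simp [PySem.List.enumerate_cons, PySem.List.enumerate_nil]
  rw [pv_new_entry pre t]
  simp [h]

-- appending a further duplicate appends its numbered entry
theorem pv_out_dup (pre : List String) (t : String) (h : 2 ≤ pre.count t) :
    (PySem.List.enumerate pre 0).map (pvF pre) ++ [t ++ "_" ++ PySem.Int.toStr ((pre.count t : Int) + 1)]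
      = (PySem.List.enumerate (pre ++ [t]) 0).map (pvF (pre ++ [t])) := by
  rw [PySem.List.enumerate_append]
  rw [List.map_append]
  rw [pv_map_congr pre t (by omega)]
  congr 1
  simp [PySem.List.enumerate_cons, PySem.List.enumerate_nil]
  rw [pv_new_entry pre t]
  simp [show ¬ pre.count t = 0 by omega]

-- the second occurrence rewrites the unique bare entry and appends t_2
theorem pv_out_second (pre : List String) (t : String) (j : Nat) (h1 : pre.count t = 1)
    (hj : j < pre.length) (hjs : pre[j]? = some t)
    (hone : (pre.take (j + 1)).count t = 1) :
    ((PySem.List.enumerate pre 0).map (pvF pre)).set j (t ++ "_1")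
        ++ [t ++ "_" ++ PySem.Int.toStr ((pre.count t : Int) + 1)]
      = (PySem.List.enumerate (pre ++ [t]) 0).map (pvF (pre ++ [t])) := by
  rw [PySem.List.enumerate_append]
  rw [List.map_append]
  rw [pv_map_set pre t j h1 hj hjs hone]
  congr 1
  simp [PySem.List.enumerate_cons, PySem.List.enumerate_nil]
  rw [pv_new_entry pre t]
  simp [show ¬ pre.count t = 0 by omega]

-- Loop invariant for B's single pass: out holds the final entries for the prefix `pre`
-- (relative to pre's own counts), seen counts pre, first maps each so-far-unique string
-- to its unique position.
theorem pv_loopB (strings : List String) (rest pre out : List String)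
    (seen first : PySem.Dict String Int)
    (hsplit : strings = pre ++ rest)
    (hseen : ∀ v, seen.getD v 0 = (pre.count v : Int))
    (hfirst : ∀ v, pre.count v = 1 → ∃ j : Nat, first.getD v 0 = (j : Int) ∧
        j < pre.length ∧ pre[j]? = some v ∧ (pre.take (j + 1)).count v = 1)
    (hout : out = (PySem.List.enumerate pre 0).map (pvF pre)) :
    ((PySem.List.enumerate rest (pre.length : Int)).foldl
      (fun (st : List String × PySem.Dict String Int × PySem.Dict String Int) p =>
        let c := st.2.1.getD p.2 0 + 1
        let seen := st.2.1.insert p.2 c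
        if c == 1 then
          (st.1 ++ [p.2], seen, st.2.2.insert p.2 p.1)
        else
          ((if c == 2 then pyAssign st.1 (st.2.2.getD p.2 0) (p.2 ++ "_1") else st.1)
             ++ [p.2 ++ "_" ++ PySem.Int.toStr c], seen, st.2.2))
      (out, seen, first)).1
    = (PySem.List.enumerate strings 0).map (pvF strings) := by
  induction rest generalizing pre out seen first with
  | nil =>
    rw [PySem.List.enumerate_nil, List.foldl_nil]
    simp only [List.append_nil] at hsplit
    subst hsplit
    exact hout
  | cons t rest' ih =>
    rw [PySem.List.enumerate_cons, List.foldl_cons]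
    dsimp only
    have hsplit' : strings = (pre ++ [t]) ++ rest' := by simp [hsplit]
    have hlen : (pre.length : Int) + 1 = (((pre ++ [t]).length : Nat) : Int) := by simp
    have hseenS : ∀ v, (seen.insert t (seen.getD t 0 + 1)).getD v 0
        = (((pre ++ [t]).count v : Nat) : Int) := by
      intro v
      rw [PySem.Dict.getD_insert]
      by_cases hv : v = t
      · subst hv; rw [hseen v]; simp [List.count_append]
      · simp [hv, hseen v, List.count_append, Ne.symm hv]
    rcases Nat.lt_or_ge (pre.count t) 1 with h0 | h1
    · -- first occurrence of t
      have h0 : pre.count t = 0 := by omega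
      rw [if_pos (by rw [hseen t, h0]; decide)]
      rw [hlen]
      apply ih (pre ++ [t]) _ _ _ hsplit' hseenS _ _
      · -- first-occurrence table stays correct
        intro v hv
        by_cases hvt : v = t
        · subst hvt
          refine ⟨pre.length, by simp [PySem.Dict.getD_insert_self], by simp, by simp, ?_⟩
          rw [List.take_of_length_le (by simp), List.count_append, h0]
          simp
        · have hz : List.count v [t] = 0 := by
            simp [List.count_cons]
            exact fun hh => hvt hh.symm
          rw [List.count_append, hz, Nat.add_zero] at hv
          rcases hfirst v hv with ⟨j, hgd, hjlt, hjget, hjone⟩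
          refine ⟨j, ?_, by simp; omega, ?_, ?_⟩
          · rw [PySem.Dict.getD_insert, if_neg hvt]; exact hgd
          · rw [List.getElem?_append_left hjlt]; exact hjget
          · rw [List.take_append_of_le_length (by omega)]; exact hjone
      · rw [hout]
        exact pv_out_new pre t h0
    · rw [if_neg (by rw [hseen t]; simp; omega)]
      rw [hlen]
      rcases Nat.lt_or_ge (pre.count t) 2 with h1' | h2
      · -- second occurrence: patch the first one
        have h1'' : pre.count t = 1 := by omega
        rcases hfirst t h1'' with ⟨j, hgd, hjlt, hjget, hjone⟩
        rw [if_pos (by rw [hseen t, h1'']; decide)]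
        apply ih (pre ++ [t]) _ _ _ hsplit' hseenS _ _
        · intro v hv
          by_cases hvt : v = t
          · subst hvt
            rw [List.count_append] at hv
            simp [h1''] at hv
          · have hz : List.count v [t] = 0 := by
              simp [List.count_cons]
              exact fun hh => hvt hh.symm
            rw [List.count_append, hz, Nat.add_zero] at hv
            rcases hfirst v hv with ⟨k, hgd', hklt, hkget, hkone⟩
            refine ⟨k, hgd', by simp; omega, ?_, ?_⟩
            · rw [List.getElem?_append_left hklt]; exact hkget
            · rw [List.take_append_of_le_length (by omega)]; exact hkone
        · rw [hout, hseen t, h1'', hgd]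
          have hassign : pyAssign ((PySem.List.enumerate pre 0).map (pvF pre)) ((j : Nat) : Int)
              (t ++ "_1") = ((PySem.List.enumerate pre 0).map (pvF pre)).set j (t ++ "_1") := by
            simp [pyAssign]
          rw [hassign]
          have := pv_out_second pre t j h1'' hjlt hjget hjone
          rw [← this, h1'']
      · -- third or later occurrence
        rw [if_neg (by rw [hseen t]; simp; omega)]
        apply ih (pre ++ [t]) _ _ _ hsplit' hseenS _ _
        · intro v hv
          by_cases hvt : v = t
          · subst hvt
            rw [List.count_append] at hv
            simp at hv
            omega
          · have hz : List.count v [t] = 0 := by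
              simp [List.count_cons]
              exact fun hh => hvt hh.symm
            rw [List.count_append, hz, Nat.add_zero] at hv
            rcases hfirst v hv with ⟨k, hgd', hklt, hkget, hkone⟩
            refine ⟨k, hgd', by simp; omega, ?_, ?_⟩
            · rw [List.getElem?_append_left hklt]; exact hkget
            · rw [List.take_append_of_le_length (by omega)]; exact hkone
        · rw [hout, hseen t]
          exact pv_out_dup pre t h2

-- ===== VERDICT (by name: the statement is the Claim_ definition above) =====
theorem uniquify_strings_spec : Claim_equal_uniquify_strings := by
  intro strings _
  have hA : uniquify_strings strings
      = (PySem.List.enumerate strings 0).map (pvF strings) := by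
    unfold uniquify_strings
    have := pv_loop strings strings [] [] PySem.Dict.empty (by simp)
      (by intro v; simp [PySem.Dict.getD_empty])
    simp only [List.length_nil, Nat.cast_zero, List.nil_append] at this
    exact this
  have hB : uniquify_strings_alt strings
      = (PySem.List.enumerate strings 0).map (pvF strings) := by
    unfold uniquify_strings_alt
    have := pv_loopB strings strings [] [] PySem.Dict.empty PySem.Dict.empty (by simp)
      (by intro v; simp [PySem.Dict.getD_empty])
      (by intro v hv; simp at hv)
      (by simp [PySem.List.enumerate])
    simp only [List.length_nil, Nat.cast_zero, List.nil_append] at this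
    exact this
  unfold Spec_uniquify_strings
  rw [hA, hB]
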